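-- pv_equiv track=rewrite | github.com/typinghare/ucas-algorithm | review/code/Greedy_OJ_2.py | solution
-- ===== SOURCE A (Python) =====
-- def solution(n, s):
--     """
--     :param n: 字符串长度
--     :param s: 字符串
--     """
--     # 准备工作：记录 s 中不同字符的末位置
--     memo = {}
--     for i in range(n):
--         memo[s[i]] = i
--
--     partition, begin, end = [], 0, 0
--     for i in range(n):
--         end = max(end, memo[s[i]])
--         if i == end:
--             # 植树问题，要加 1
--             partition.append(end - begin + 1)
--             begin = end + 1
--     return partition
-- ===== SOURCE B (Python) =====
-- def solution(n, s):
--     # Interval-merging strategy: record each character's [first, last] occurrence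
--     # span in one scan, then merge overlapping spans (spans come out already
--     # ordered by start, since dicts keep insertion order) and emit the lengths.
--     first = {}
--     last = {}
--     for i in range(n):
--         c = s[i]
--         if c not in first:
--             first[c] = i
--         last[c] = i
--     result = []
--     cur = None  # (start, end) of the segment being merged
--     for c, a in first.items():
--         b = last[c]
--         if cur is None:
--             cur = (a, b)
--         elif a > cur[1]:
--             result.append(cur[1] - cur[0] + 1)
--             cur = (a, b)
--         else:
--             cur = (cur[0], max(cur[1], b))
--     if cur is not None:
--         result.append(cur[1] - cur[0] + 1)
--     return result
-- ===== Notes on version B (the rewrite author's own statement) =====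
-- stated objective: faster
-- what changed: A's greedy single-pass window (running max of last occurrence, cutting when the index reaches it) is replaced by computing each character's [first,last] occurrence interval in one scan and then merging overlapping intervals (intervals arrive sorted by start via dict insertion order), emitting each merged segment's length.
import Mathlib
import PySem

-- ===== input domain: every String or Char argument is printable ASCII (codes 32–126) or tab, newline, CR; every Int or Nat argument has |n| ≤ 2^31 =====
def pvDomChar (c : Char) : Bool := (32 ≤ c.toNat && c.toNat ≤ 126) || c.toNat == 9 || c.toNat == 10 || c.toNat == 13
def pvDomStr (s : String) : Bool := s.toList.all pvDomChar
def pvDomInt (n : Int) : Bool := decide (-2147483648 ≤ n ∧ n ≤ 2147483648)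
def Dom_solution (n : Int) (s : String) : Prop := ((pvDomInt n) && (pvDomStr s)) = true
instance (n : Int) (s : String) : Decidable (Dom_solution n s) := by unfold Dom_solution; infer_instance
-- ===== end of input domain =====

-- B replaces A's greedy running-max window with an interval-merging strategy
-- (per-character [first,last] occurrence spans, merged left to right); same O(n)
-- asymptotics, measured constant-factor faster (the merge loop touches only the
-- distinct characters, not every index).

-- ===== PORT A =====
def solution (n : Int) (s : String) : List Int :=
  -- memo = {}; for i in range(n): memo[s[i]] = i
  let memo : PySem.Dict Char Int :=
    (PySem.List.pyRange 0 n).foldl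
      (fun d i => d.insert ((PySem.Str.pyGet? s i).getD ' ') i) PySem.Dict.empty
  -- partition, begin, end = [], 0, 0
  let st : List Int × Int × Int :=
    (PySem.List.pyRange 0 n).foldl
      (fun st i =>
        let e := max st.2.2 (memo.getD ((PySem.Str.pyGet? s i).getD ' ') 0)
        if i = e then (st.1 ++ [e - st.2.1 + 1], e + 1, e)
        else (st.1, st.2.1, e))
      ([], 0, 0)
  st.1

-- ===== PORT B =====
def solution_alt (n : Int) (s : String) : List Int :=
  -- first = {}; last = {}; for i in range(n): c = s[i]; if c not in first: first[c] = i; last[c] = i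
  let fl : PySem.Dict Char Int × PySem.Dict Char Int :=
    (PySem.List.pyRange 0 n).foldl
      (fun fl i =>
        let c := (PySem.Str.pyGet? s i).getD ' '
        ((if fl.1.contains c then fl.1 else fl.1.insert c i), fl.2.insert c i))
      (PySem.Dict.empty, PySem.Dict.empty)
  -- result = []; cur = None; for c, a in first.items(): …
  let st : List Int × Option (Int × Int) :=
    fl.1.items.foldl
      (fun st ca =>
        let b := fl.2.getD ca.1 0
        match st.2 with
        | none => (st.1, some (ca.2, b))
        | some cur =>
            if ca.2 > cur.2 then (st.1 ++ [cur.2 - cur.1 + 1], some (ca.2, b))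
            else (st.1, some (cur.1, max cur.2 b)))
      ([], none)
  -- if cur is not None: result.append(cur[1] - cur[0] + 1)
  match st.2 with
  | none => st.1
  | some cur => st.1 ++ [cur.2 - cur.1 + 1]

-- ===== PRECONDITION & SPEC =====
-- Pre_ excludes exactly the inputs where A raises IndexError: n beyond the length of s.
def Pre_solution (n : Int) (s : String) : Prop := n ≤ (s.toList.length : Int)
instance (n : Int) (s : String) : Decidable (Pre_solution n s) := by unfold Pre_solution; infer_instance
def pvWitness_solution : Int × String := (9, "ababcbacd")

def Spec_solution (n : Int) (s : String) (out : List Int) : Prop := out = solution_alt n s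
instance (n : Int) (s : String) (out : List Int) : Decidable (Spec_solution n s out) := by unfold Spec_solution; infer_instance

-- ===== CLAIM (what is proved, stated in full; the proofs are below) =====
def Claim_equal_solution : Prop := ∀ (n : Int) (s : String), Dom_solution n s → Pre_solution n s → Spec_solution n s (solution n s)

-- ===== LEMMAS AND PROOFS =====

theorem foldRange {β : Type} (l : List Char) (f : β → Int × Char → β) :
    ∀ (t : List Char) (k : Nat), l.drop k = t → ∀ (init : β),
      (PySem.List.pyRange (k : Int) (l.length : Int)).foldl
        (fun acc i => f acc (i, (PySem.List.pyGet? l i).getD ' ')) init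
      = (PySem.List.enumerate t (k : Int)).foldl f init := by
  intro t
  induction t with
  | nil =>
      intro k hk init
      rw [PySem.List.pyRange_one_eq_nil (by
        have := List.drop_eq_nil_iff.mp hk; exact_mod_cast this)]
      simp [PySem.List.enumerate]
  | cons c t ih =>
      intro k hk init
      have hklt : k < l.length := by
        by_contra h
        rw [List.drop_eq_nil_iff.mpr (by omega)] at hk
        exact (List.cons_ne_nil c t) hk.symm
      have hget : l[k]? = some c := by
        have h0 : (l.drop k)[0]? = some c := by rw [hk]; rfl
        rwa [List.getElem?_drop] at h0
      rw [PySem.List.pyRange_one_cons (by exact_mod_cast hklt)]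
      have hdrop : l.drop (k + 1) = t := by
        have := List.drop_drop (l := l) (i := 1) (j := k)
        rw [← this, hk]  -- hope: drop 1 (drop k l)? order
        rfl
      simp only [List.foldl_cons, PySem.List.pyGet?_natCast, hget, Option.getD_some,
        PySem.List.enumerate]
      have := ih (k + 1) hdrop (f init ((k : Int), c))
      push_cast at this ⊢
      exact this

theorem strFold {β : Type} (s : String) (n : Int) (h0 : 0 ≤ n) (hle : n ≤ (s.toList.length : Int))
    (g : β → Int × Char → β) (init : β) :
    (PySem.List.pyRange 0 n).foldl
      (fun acc i => g acc (i, (PySem.Str.pyGet? s i).getD ' ')) init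
    = (PySem.List.enumerate (s.toList.take n.toNat)).foldl g init := by
  set l : List Char := s.toList.take n.toNat with hl
  have hm : n.toNat ≤ s.toList.length := by omega
  have hlen : l.length = n.toNat := by rw [hl, List.length_take]; omega
  have hn : n = (l.length : Int) := by omega
  rw [hn]
  have hcongr : (PySem.List.pyRange 0 (l.length : Int)).foldl
      (fun acc i => g acc (i, (PySem.Str.pyGet? s i).getD ' ')) init
      = (PySem.List.pyRange 0 (l.length : Int)).foldl
      (fun acc i => g acc (i, (PySem.List.pyGet? l i).getD ' ')) init := by
    apply PySem.List.foldl_congr_mem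
    intro acc x hx
    rw [PySem.List.mem_pyRange_one] at hx
    obtain ⟨hx0, hx1⟩ := hx
    have hxe : x = (x.toNat : Int) := by omega
    have hxlt : x.toNat < l.length := by omega
    rw [hxe, PySem.Str.pyGet?_natCast, PySem.List.pyGet?_natCast]
    have : l[x.toNat]? = s.toList[x.toNat]? := by
      rw [hl, List.getElem?_take_of_lt]; omega
    rw [this]
  rw [hcongr]
  have h2 := foldRange l g l 0 (by simp) init
  norm_num at h2
  exact h2

theorem getD_foldl_insert (ps : List (Int × Char)) : ∀ (d0 : PySem.Dict Char Int) (c : Char),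
    (ps.foldl (fun d p => d.insert p.2 p.1) d0).getD c 0 =
      (match ps.reverse.find? (fun p => p.2 == c) with
        | some p => p.1
        | none => d0.getD c 0) := by
  induction ps with
  | nil => intro d0 c; simp
  | cons p ps ih =>
      intro d0 c
      rw [List.foldl_cons, ih, List.reverse_cons, List.find?_append]
      cases hf : ps.reverse.find? (fun p => p.2 == c) with
      | some q => simp [hf]
      | none =>
          simp only [hf, Option.none_or]
          by_cases hc : p.2 = c
          · simp [hc, PySem.Dict.getD_insert]
          · simp [hc, PySem.Dict.getD_insert, Ne.symm hc]

theorem mem_enum (l : List Char) :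
    ∀ (k : Int) (p : Int × Char), p ∈ PySem.List.enumerate l k ↔
      ∃ j : Nat, j < l.length ∧ p.1 = k + j ∧ l[j]? = some p.2 := by
  induction l with
  | nil => intro k p; simp [PySem.List.enumerate]
  | cons c t ih =>
      intro k p
      simp only [PySem.List.enumerate, List.mem_cons, ih (k + 1)]
      constructor
      · rintro (rfl | ⟨j, hj, hp1, hp2⟩)
        · exact ⟨0, by simp⟩
        · exact ⟨j + 1, by simpa using hj, by push_cast; omega, by simpa using hp2⟩
      · rintro ⟨j, hj, hp1, hp2⟩
        cases j with
        | zero =>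
            left
            simp at hp2
            obtain ⟨p1, p2⟩ := p
            simp at hp1 hp2 ⊢
            exact ⟨hp1, hp2.symm⟩
        | succ j =>
            right
            exact ⟨j, by simpa using hj, by push_cast at hp1 ⊢; omega, by simpa using hp2⟩

theorem enum_pairwise (l : List Char) : ∀ (k : Int),
    (PySem.List.enumerate l k).Pairwise (fun p q => p.1 < q.1) := by
  induction l with
  | nil => intro k; simp [PySem.List.enumerate]
  | cons c t ih =>
      intro k
      simp only [PySem.List.enumerate]
      refine List.Pairwise.cons ?_ (ih (k + 1))
      intro q hq
      obtain ⟨j, hj, hq1, hq2⟩ := (mem_enum t (k + 1) q).mp hq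
      simp only
      omega

def lastD (l : List Char) : PySem.Dict Char Int :=
  (PySem.List.enumerate l).foldl (fun d p => d.insert p.2 p.1) PySem.Dict.empty

def LV (l : List Char) (c : Char) : Int := (lastD l).getD c 0

theorem LV_spec (l : List Char) (i : Nat) (h : i < l.length) :
    (i : Int) ≤ LV l l[i] ∧ LV l l[i] < (l.length : Int) := by
  have hmem : ((i : Int), l[i]) ∈ (PySem.List.enumerate l 0).reverse := by
    rw [List.mem_reverse, mem_enum]
    exact ⟨i, h, by omega, by simp⟩
  have hsome : ((PySem.List.enumerate l 0).reverse.find? (fun p => p.2 == l[i])).isSome := by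
    rw [List.find?_isSome]
    exact ⟨_, hmem, by simp⟩
  obtain ⟨q, hq⟩ := Option.isSome_iff_exists.mp hsome
  have hLV : LV l l[i] = q.1 := by
    rw [LV, lastD, getD_foldl_insert, hq]
  obtain ⟨hpred, as, bs, hsplit, hfail⟩ := List.find?_eq_some_iff_append.mp hq
  have hqmem : q ∈ PySem.List.enumerate l 0 := by
    rw [← List.mem_reverse, hsplit]
    simp
  obtain ⟨j, hj, hq1, hq2⟩ := (mem_enum l 0 q).mp hqmem
  constructor
  · have hpw : ((PySem.List.enumerate l 0).reverse).Pairwise (fun p r => r.1 < p.1) := by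
      rw [List.pairwise_reverse]
      exact enum_pairwise l 0
    rw [hsplit] at hpw
    have hbs : ∀ b ∈ bs, b.1 < q.1 := by
      have := (List.pairwise_append.mp hpw).2.1
      intro b hb
      exact (List.pairwise_cons.mp this).1 b hb
    rw [hsplit] at hmem
    rcases List.mem_append.mp hmem with hin | hin
    · exact absurd (by simp : ((i:Int), l[i]).2 == l[i]) (by simpa using hfail _ hin)
    · rcases List.mem_cons.mp hin with heq | hin
      · rw [hLV, ← heq]
      · have := hbs _ hin
        simp only at this
        omega
  · rw [hLV]; omega

def firstsAux : List Char → Int → List Char → List (Char × Int)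
  | [], _, _ => []
  | c :: t, k, seen =>
      if c ∈ seen then firstsAux t (k + 1) seen
      else (c, k) :: firstsAux t (k + 1) (c :: seen)

def seenAfter (xs : List Char) (seen : List Char) : List Char :=
  xs.foldl (fun sn c => if c ∈ sn then sn else c :: sn) seen

theorem mem_seenAfter (xs : List Char) : ∀ (seen : List Char) (c : Char),
    c ∈ seenAfter xs seen ↔ c ∈ seen ∨ c ∈ xs := by
  induction xs with
  | nil => intro seen c; simp [seenAfter]
  | cons x t ih =>
      intro seen c
      have hstep : seenAfter (x :: t) seen = seenAfter t (if x ∈ seen then seen else x :: seen) := rfl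
      rw [hstep, ih]
      by_cases hx : x ∈ seen <;> by_cases hcx : c = x <;>
        simp [hx, hcx, List.mem_cons] <;> tauto

theorem firstsAux_congr (t : List Char) : ∀ (k : Int) (s1 s2 : List Char),
    (∀ c, c ∈ s1 ↔ c ∈ s2) → firstsAux t k s1 = firstsAux t k s2 := by
  induction t with
  | nil => intro _ _ _ _; rfl
  | cons c t ih =>
      intro k s1 s2 hs
      simp only [firstsAux]
      by_cases hc : c ∈ s1
      · rw [if_pos hc, if_pos ((hs c).mp hc), ih _ _ _ hs]
      · rw [if_neg hc, if_neg (fun h => hc ((hs c).mpr h)), ih _ (c :: s1) (c :: s2)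
          (by intro x; simp [hs x])]

theorem firstsAux_append (xs : List Char) : ∀ (ys : List Char) (k : Int) (seen : List Char),
    firstsAux (xs ++ ys) k seen
      = firstsAux xs k seen ++ firstsAux ys (k + xs.length) (seenAfter xs seen) := by
  induction xs with
  | nil => intro ys k seen; simp [firstsAux, seenAfter]
  | cons c t ih =>
      intro ys k seen
      have hcast : k + 1 + (t.length : Int) = k + ((c :: t).length : Int) := by
        push_cast [List.length_cons]; ring
      have hsa : seenAfter (c :: t) seen = seenAfter t (if c ∈ seen then seen else c :: seen) := rfl
      simp only [List.cons_append, firstsAux, hsa]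
      by_cases hc : c ∈ seen
      · rw [if_pos hc, if_pos hc, ih, hcast]
        simp [hc]
      · rw [if_neg hc, if_neg hc, ih, List.cons_append, hcast]
        simp [hc]

theorem contains_iff_mem (d : PySem.Dict Char Int) (c : Char) :
    d.contains c = true ↔ c ∈ d.items.map Prod.fst := by
  simp [PySem.Dict.contains, List.any_eq_true, List.mem_map]

theorem firstFold (t : List Char) : ∀ (k : Int) (d : PySem.Dict Char Int),
    ((PySem.List.enumerate t k).foldl
        (fun fd (p : Int × Char) => if fd.contains p.2 then fd else fd.insert p.2 p.1) d).items
      = d.items ++ firstsAux t k (d.items.map Prod.fst) := by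
  induction t with
  | nil => intro k d; simp [PySem.List.enumerate, firstsAux]
  | cons c t ih =>
      intro k d
      have hstep : PySem.List.enumerate (c :: t) k = (k, c) :: PySem.List.enumerate t (k + 1) := rfl
      rw [hstep, List.foldl_cons]
      simp only [firstsAux]
      by_cases hc : c ∈ d.items.map Prod.fst
      · rw [if_pos ((contains_iff_mem d c).mpr hc)]
        rw [if_pos hc, ih]
      · rw [if_neg (fun h => hc ((contains_iff_mem d c).mp h)), if_neg hc, ih]
        have hins : (d.insert c k).items = d.items ++ [(c, k)] := by
          simp only [PySem.Dict.insert]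
          rw [if_neg (fun h => hc ((contains_iff_mem d c).mp h))]
        rw [hins]
        rw [List.append_assoc]
        congr 1
        simp only [List.cons_append, List.nil_append]
        rw [firstsAux_congr t (k + 1) _ (c :: d.items.map Prod.fst) (by
          intro x; simp [List.mem_append, List.mem_cons]; tauto)]

def aStep (lv : Char → Int) (st : List Int × Int × Int) (p : Int × Char) : List Int × Int × Int :=
  let e := max st.2.2 (lv p.2)
  if p.1 = e then (st.1 ++ [e - st.2.1 + 1], e + 1, e) else (st.1, st.2.1, e)

def bStep (lv : Char → Int) (st : List Int × Option (Int × Int)) (ca : Char × Int) :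
    List Int × Option (Int × Int) :=
  let b := lv ca.1
  match st.2 with
  | none => (st.1, some (ca.2, b))
  | some cur =>
      if ca.2 > cur.2 then (st.1 ++ [cur.2 - cur.1 + 1], some (ca.2, b))
      else (st.1, some (cur.1, max cur.2 b))

def AS (l : List Char) (k : Nat) : List Int × Int × Int :=
  (PySem.List.enumerate (l.take k)).foldl (aStep (LV l)) ([], 0, 0)

def BS (l : List Char) (k : Nat) : List Int × Option (Int × Int) :=
  (firstsAux (l.take k) 0 []).foldl (bStep (LV l)) ([], none)

theorem AS_succ (l : List Char) (k : Nat) (h : k < l.length) :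
    AS l (k + 1) = aStep (LV l) (AS l k) ((k : Int), l[k]) := by
  unfold AS
  rw [List.take_add_one, List.getElem?_eq_getElem h]
  simp only [Option.toList_some]
  rw [PySem.List.enumerate_append, List.foldl_append]
  have hlen : (l.take k).length = k := by simp; omega
  rw [hlen]
  simp [PySem.List.enumerate]

theorem mem_take_iff (l : List Char) (k : Nat) (c : Char) :
    c ∈ l.take k ↔ ∃ j : Nat, ∃ hj : j < l.length, j < k ∧ l[j] = c := by
  constructor
  · intro hc
    obtain ⟨j, hj, he⟩ := List.mem_iff_getElem.mp hc
    have hj' : j < l.length := lt_of_lt_of_le hj (by simp)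
    exact ⟨j, hj', by simp at hj; omega, by rw [← he]; simp⟩
  · rintro ⟨j, hj, hjk, he⟩
    apply List.mem_iff_getElem.mpr
    refine ⟨j, by simp; omega, ?_⟩
    rw [List.getElem_take]; exact he

theorem BS_succ (l : List Char) (k : Nat) (h : k < l.length) :
    BS l (k + 1) = if l[k] ∈ l.take k then BS l k else bStep (LV l) (BS l k) (l[k], (k : Int)) := by
  unfold BS
  rw [List.take_add_one, List.getElem?_eq_getElem h]
  simp only [Option.toList_some]
  rw [firstsAux_append]
  have hlen : (l.take k).length = k := by simp; omega
  rw [List.foldl_append, hlen]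
  by_cases hm : l[k] ∈ l.take k
  · rw [if_pos hm]
    have : firstsAux [l[k]] (0 + (k:Int)) (seenAfter (l.take k) []) = [] := by
      simp only [firstsAux]
      rw [if_pos ((mem_seenAfter _ _ _).mpr (Or.inr hm))]
    rw [this]
    rfl
  · rw [if_neg hm]
    have : firstsAux [l[k]] (0 + (k:Int)) (seenAfter (l.take k) []) = [(l[k], (k:Int))] := by
      simp only [firstsAux]
      rw [if_neg (fun hx => by rcases (mem_seenAfter _ _ _).mp hx with h' | h'
                               · simp at h'
                               · exact hm h')]
      norm_num
    rw [this]
    rfl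

def InvAB (l : List Char) (k : Nat) : Prop :=
  ∃ cs R, BS l k = (R, some (cs, (AS l k).2.2)) ∧
    (k : Int) - 1 ≤ (AS l k).2.2 ∧ (AS l k).2.2 ≤ (l.length : Int) - 1 ∧
    (∀ j : Nat, ∀ hj : j < l.length, j < k → LV l l[j] ≤ (AS l k).2.2) ∧
    (((AS l k).2.2 = (k : Int) - 1 ∧ (AS l k).1 = R ++ [(AS l k).2.2 - cs + 1] ∧ (AS l k).2.1 = (k : Int)) ∨
     ((k : Int) - 1 < (AS l k).2.2 ∧ (AS l k).1 = R ∧ (AS l k).2.1 = cs))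

theorem inv_holds (l : List Char) : ∀ (k : Nat), k + 1 ≤ l.length → InvAB l (k + 1) := by
  intro k
  induction k with
  | zero =>
      intro hk
      have h0 : 0 < l.length := hk
      have hLVs := LV_spec l 0 h0
      have hLV1 : (0 : Int) ≤ LV l l[0] := by exact_mod_cast hLVs.1
      have hLV2 : LV l l[0] < (l.length : Int) := hLVs.2
      have hmax : max 0 (LV l l[0]) = LV l l[0] := max_eq_right hLV1
      have hAS : AS l 1 = aStep (LV l) (AS l 0) ((0 : Int), l[0]) := by
        have := AS_succ l 0 h0
        norm_num at this ⊢
        exact this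
      have hAS0 : AS l 0 = ([], 0, 0) := by simp [AS]
      have hBS : BS l 1 = bStep (LV l) (BS l 0) (l[0], (0 : Int)) := by
        have := BS_succ l 0 h0
        rw [if_neg (by simp)] at this
        norm_num at this ⊢
        exact this
      have hBS0 : BS l 0 = ([], none) := by simp [BS, firstsAux]
      set e := LV l l[0] with hedef
      have hB1 : BS l 1 = ([], some (0, e)) := by
        rw [hBS, hBS0]
        rfl
      by_cases he0 : (0 : Int) = e
      · have hA1 : AS l 1 = ([e - 0 + 1], e + 1, e) := by
          rw [hAS, hAS0]
          simp only [aStep]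
          rw [hmax, if_pos he0]
          simp
        refine ⟨0, [], ?_, ?_, ?_, ?_, Or.inl ⟨?_, ?_, ?_⟩⟩ <;> simp only [hA1, hB1] <;>
          first
            | rfl
            | (intro j hj hj1
               have hj0 : j = 0 := by omega
               subst hj0
               exact le_of_eq hedef.symm)
            | omega
            | simp
      · have hA1 : AS l 1 = ([], 0, e) := by
          rw [hAS, hAS0]
          simp only [aStep]
          rw [hmax, if_neg he0]
        refine ⟨0, [], ?_, ?_, ?_, ?_, Or.inr ⟨?_, ?_, ?_⟩⟩ <;> simp only [hA1, hB1] <;>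
          first
            | rfl
            | (intro j hj hj1
               have hj0 : j = 0 := by omega
               subst hj0
               exact le_of_eq hedef.symm)
            | omega
            | simp
  | succ k ih =>
      intro hk
      have hK : k + 1 < l.length := hk
      obtain ⟨cs, R, hBSe, hge, hle, hall, hdisj⟩ := ih (by omega)
      have hLVs := LV_spec l (k + 1) hK
      have hLV1 : ((k + 1 : Nat) : Int) ≤ LV l l[k + 1] := hLVs.1
      have hLV2 : LV l l[k + 1] < (l.length : Int) := hLVs.2
      have hAS : AS l (k + 1 + 1) = aStep (LV l) (AS l (k + 1)) (((k + 1 : Nat) : Int), l[k + 1]) :=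
        AS_succ l (k + 1) hK
      have hBSs := BS_succ l (k + 1) hK
      rcases hASk : AS l (k + 1) with ⟨P, b, e⟩
      rw [hASk] at hBSe hge hle hall hdisj hAS
      simp only at hBSe hge hle hall hdisj
      by_cases hmem : l[k + 1] ∈ l.take (k + 1)
      · -- repeated character: B's state is unchanged
        rw [if_pos hmem, hBSe] at hBSs
        obtain ⟨j, hj, hjk, hje⟩ := (mem_take_iff _ _ _).mp hmem
        have hLc : LV l l[k + 1] ≤ e := by
          rw [← hje]; exact hall j hj hjk
        have hek : ((k + 1 : Nat) : Int) ≤ e := le_trans hLV1 hLc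
        obtain ⟨hgt, hPR, hbcs⟩ : ((k + 1 : Nat) : Int) - 1 < e ∧ P = R ∧ b = cs := by
          rcases hdisj with ⟨hea, _, _⟩ | h
          · exfalso; omega
          · exact h
        have hmax : max e (LV l l[k + 1]) = e := max_eq_left hLc
        by_cases hcut : ((k + 1 : Nat) : Int) = e
        · have hA2 : AS l (k + 1 + 1) = (P ++ [e - b + 1], e + 1, e) := by
            rw [hAS]; simp only [aStep]; rw [hmax, if_pos hcut]
          refine ⟨cs, R, ?_, ?_, ?_, ?_, Or.inl ⟨?_, ?_, ?_⟩⟩ <;>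
            simp only [hA2, hBSs]
          · omega
          · omega
          · intro j' hj' hj'k
            rcases Nat.lt_succ_iff_lt_or_eq.mp hj'k with h' | h'
            · exact hall j' hj' h'
            · subst h'; exact hLc
          · omega
          · rw [hPR, hbcs]
          · omega
        · have hA2 : AS l (k + 1 + 1) = (P, b, e) := by
            rw [hAS]; simp only [aStep]; rw [hmax, if_neg hcut]
          refine ⟨cs, R, ?_, ?_, ?_, ?_, Or.inr ⟨?_, ?_, ?_⟩⟩ <;>
            simp only [hA2, hBSs]
          · omega
          · omega
          · intro j' hj' hj'k
            rcases Nat.lt_succ_iff_lt_or_eq.mp hj'k with h' | h'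
            · exact hall j' hj' h'
            · subst h'; exact hLc
          · omega
          · exact hPR
          · exact hbcs
      · -- fresh character: B consumes its interval
        rw [if_neg hmem, hBSe] at hBSs
        rcases hdisj with ⟨hea, hPa, hba⟩ | ⟨hgt, hPR, hbcs⟩
        · -- A just cut at k: B emits the previous segment and opens a new one
          have hcond : ((k + 1 : Nat) : Int) > e := by omega
          have hB2 : BS l (k + 1 + 1) = (R ++ [e - cs + 1], some (((k + 1 : Nat) : Int), LV l l[k + 1])) := by
            rw [hBSs]; simp only [bStep]; rw [if_pos hcond]
          have hmax : max e (LV l l[k + 1]) = LV l l[k + 1] := max_eq_right (by omega)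
          by_cases hcut : ((k + 1 : Nat) : Int) = LV l l[k + 1]
          · have hA2 : AS l (k + 1 + 1) = (P ++ [LV l l[k + 1] - b + 1], LV l l[k + 1] + 1, LV l l[k + 1]) := by
              rw [hAS]; simp only [aStep]; rw [hmax, if_pos hcut]
            refine ⟨((k + 1 : Nat) : Int), R ++ [e - cs + 1], ?_, ?_, ?_, ?_, Or.inl ⟨?_, ?_, ?_⟩⟩ <;>
              simp only [hA2, hB2]
            · omega
            · omega
            · intro j' hj' hj'k
              rcases Nat.lt_succ_iff_lt_or_eq.mp hj'k with h' | h'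
              · have := hall j' hj' h'; omega
              · subst h'; omega
            · omega
            · rw [hPa, hba]
            · omega
          · have hA2 : AS l (k + 1 + 1) = (P, b, LV l l[k + 1]) := by
              rw [hAS]; simp only [aStep]; rw [hmax, if_neg hcut]
            refine ⟨((k + 1 : Nat) : Int), R ++ [e - cs + 1], ?_, ?_, ?_, ?_, Or.inr ⟨?_, ?_, ?_⟩⟩ <;>
              simp only [hA2, hB2]
            · omega
            · omega
            · intro j' hj' hj'k
              rcases Nat.lt_succ_iff_lt_or_eq.mp hj'k with h' | h'
              · have := hall j' hj' h'; omega
              · subst h'; omega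
            · omega
            · exact hPa
            · exact hba
        · -- open segment: B merges the new interval
          have hcond : ¬ (((k + 1 : Nat) : Int) > e) := by omega
          have hB2 : BS l (k + 1 + 1) = (R, some (cs, max e (LV l l[k + 1]))) := by
            rw [hBSs]; simp only [bStep]; rw [if_neg hcond]
          by_cases hcut : ((k + 1 : Nat) : Int) = max e (LV l l[k + 1])
          · have hA2 : AS l (k + 1 + 1) = (P ++ [max e (LV l l[k + 1]) - b + 1], max e (LV l l[k + 1]) + 1, max e (LV l l[k + 1])) := by
              rw [hAS]; simp only [aStep]; rw [if_pos hcut]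
            refine ⟨cs, R, ?_, ?_, ?_, ?_, Or.inl ⟨?_, ?_, ?_⟩⟩ <;>
              simp only [hA2, hB2]
            · omega
            · omega
            · intro j' hj' hj'k
              rcases Nat.lt_succ_iff_lt_or_eq.mp hj'k with h' | h'
              · have := hall j' hj' h'; omega
              · subst h'; omega
            · omega
            · rw [hPR, hbcs]
            · omega
          · have hA2 : AS l (k + 1 + 1) = (P, b, max e (LV l l[k + 1])) := by
              rw [hAS]; simp only [aStep]; rw [if_neg hcut]
            refine ⟨cs, R, ?_, ?_, ?_, ?_, Or.inr ⟨?_, ?_, ?_⟩⟩ <;>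
              simp only [hA2, hB2]
            · omega
            · omega
            · intro j' hj' hj'k
              rcases Nat.lt_succ_iff_lt_or_eq.mp hj'k with h' | h'
              · have := hall j' hj' h'; omega
              · subst h'; omega
            · omega
            · exact hPR
            · exact hbcs

theorem core_eq (l : List Char) (hl : l ≠ []) :
    (match (BS l l.length).2 with
      | none => (BS l l.length).1
      | some cur => (BS l l.length).1 ++ [cur.2 - cur.1 + 1])
    = (AS l l.length).1 := by
  have hlen : 0 < l.length := List.length_pos_iff.mpr hl
  obtain ⟨m, hm⟩ : ∃ m, l.length = m + 1 := ⟨l.length - 1, by omega⟩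
  obtain ⟨cs, R, hBSe, hge, hle, hall, hdisj⟩ := inv_holds l m (by omega)
  rw [hm] at hle
  obtain ⟨hea, hP, hb⟩ : (AS l (m + 1)).2.2 = ((m + 1 : Nat) : Int) - 1 ∧
      (AS l (m + 1)).1 = R ++ [(AS l (m + 1)).2.2 - cs + 1] ∧ (AS l (m + 1)).2.1 = ((m + 1 : Nat) : Int) := by
    rcases hdisj with h | ⟨hgt, _, _⟩
    · exact h
    · exfalso; omega
  rw [hm, hBSe]
  simp only
  rw [hP]

theorem lastD_conv (s : String) (n : Int) (h0 : 0 ≤ n) (hle : n ≤ (s.toList.length : Int)) :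
    (PySem.List.pyRange 0 n).foldl
      (fun d i => d.insert ((PySem.Str.pyGet? s i).getD ' ') i) PySem.Dict.empty
    = lastD (s.toList.take n.toNat) := by
  have h := strFold s n h0 hle (fun (d : PySem.Dict Char Int) (p : Int × Char) => d.insert p.2 p.1)
    PySem.Dict.empty
  exact h

theorem solA_eq (s : String) (n : Int) (h0 : 0 ≤ n) (hle : n ≤ (s.toList.length : Int)) :
    solution n s = (AS (s.toList.take n.toNat) (s.toList.take n.toNat).length).1 := by
  unfold solution
  rw [lastD_conv s n h0 hle]
  have h := strFold s n h0 hle (aStep (LV (s.toList.take n.toNat))) ([], 0, 0)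
  simp only [AS, List.take_length]
  rw [← h]
  rfl

theorem solB_eq (s : String) (n : Int) (h0 : 0 ≤ n) (hle : n ≤ (s.toList.length : Int)) :
    solution_alt n s =
      (match (BS (s.toList.take n.toNat) (s.toList.take n.toNat).length).2 with
        | none => (BS (s.toList.take n.toNat) (s.toList.take n.toNat).length).1
        | some cur => (BS (s.toList.take n.toNat) (s.toList.take n.toNat).length).1
            ++ [cur.2 - cur.1 + 1]) := by
  set l := s.toList.take n.toNat with hldef
  unfold solution_alt
  have hfl : (PySem.List.pyRange 0 n).foldl
      (fun fl i =>
        let c := (PySem.Str.pyGet? s i).getD ' '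
        ((if fl.1.contains c then fl.1 else fl.1.insert c i), fl.2.insert c i))
      (PySem.Dict.empty, PySem.Dict.empty)
      = ((PySem.List.enumerate l).foldl
          (fun fd (p : Int × Char) => if fd.contains p.2 then fd else fd.insert p.2 p.1)
          PySem.Dict.empty,
         lastD l) := by
    have h := strFold s n h0 hle
      (fun (fl : PySem.Dict Char Int × PySem.Dict Char Int) (p : Int × Char) =>
        ((fun (d : PySem.Dict Char Int) (p : Int × Char) =>
            if d.contains p.2 then d else d.insert p.2 p.1) fl.1 p,
         (fun (d : PySem.Dict Char Int) (p : Int × Char) => d.insert p.2 p.1) fl.2 p))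
      (PySem.Dict.empty, PySem.Dict.empty)
    have hsplit := PySem.List.foldl_prod_mk
      (fun (d : PySem.Dict Char Int) (p : Int × Char) =>
        if d.contains p.2 then d else d.insert p.2 p.1)
      (fun (d : PySem.Dict Char Int) (p : Int × Char) => d.insert p.2 p.1)
      (PySem.List.enumerate l) PySem.Dict.empty PySem.Dict.empty
    exact h.trans hsplit
  rw [hfl]
  simp only
  rw [firstFold]
  simp only [PySem.Dict.empty, List.map_nil, List.nil_append]
  have h2 : (firstsAux l 0 []).foldl
      (fun (st : List Int × Option (Int × Int)) ca =>
        let b := (lastD l).getD ca.1 0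
        match st.2 with
        | none => (st.1, some (ca.2, b))
        | some cur =>
            if ca.2 > cur.2 then (st.1 ++ [cur.2 - cur.1 + 1], some (ca.2, b))
            else (st.1, some (cur.1, max cur.2 b)))
      ([], none) = BS l l.length := by
    simp only [BS, List.take_length]
    rfl
  rw [h2]

theorem main_eq (n : Int) (s : String) (hpre : n ≤ (s.toList.length : Int)) :
    solution n s = solution_alt n s := by
  by_cases h0 : n ≤ 0
  · have hr : PySem.List.pyRange 0 n = [] := PySem.List.pyRange_one_eq_nil h0
    simp [solution, solution_alt, hr]
    rfl
  · push_neg at h0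
    have h0' : 0 ≤ n := le_of_lt h0
    have hl : s.toList.take n.toNat ≠ [] := by
      have : (s.toList.take n.toNat).length = n.toNat := by rw [List.length_take]; omega
      intro hcon
      rw [hcon] at this
      simp at this
      omega
    rw [solA_eq s n h0' hpre, solB_eq s n h0' hpre, core_eq _ hl]

-- ===== VERDICT (by name: the statement is the Claim_ definition above) =====
theorem solution_spec : Claim_equal_solution := by
  intro n s _ hpre
  exact main_eq n s hpre
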